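-- pv_equiv track=rewrite | github.com/AES256Afro/WinnyTool | core/sysinfo.py | _parse_format_list
-- ===== SOURCE A (Python) =====
-- def _parse_format_list(raw: str) -> list[dict[str, str]]:
--     """Parse PowerShell Format-List output into a list of dicts.
--
--     Format-List produces lines like:
--         Key : Value
--     with blank lines separating records.
--     """
--     records = []
--     current = {}
--     for line in raw.splitlines():
--         line = line.strip()
--         if not line:
--             if current:
--                 records.append(current)
--                 current = {}
--             continue
--         if " : " in line:
--             key, _, value = line.partition(" : ")
--             current[key.strip()] = value.strip()
--         elif ":" in line:
--             key, _, value = line.partition(":")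
--             current[key.strip()] = value.strip()
--     if current:
--         records.append(current)
--     return records
-- ===== SOURCE B (Python) =====
-- def _split_kv(s):
--     """Return (key, value) for a line, preferring ' : ' over ':', or None."""
--     i = s.find(" : ")
--     if i >= 0:
--         return s[:i].strip(), s[i + 3:].strip()
--     j = s.find(":")
--     if j >= 0:
--         return s[:j].strip(), s[j + 1:].strip()
--     return None
--
--
-- def _parse_format_list(raw: str) -> list[dict[str, str]]:
--     # Pass 1: group stripped non-empty lines into blocks separated by blank lines.
--     blocks = []
--     buf = []
--     for line in raw.splitlines():
--         s = line.strip()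
--         if s:
--             buf.append(s)
--         elif buf:
--             blocks.append(buf)
--             buf = []
--     if buf:
--         blocks.append(buf)
--     # Pass 2: turn each block into a dict; keep only non-empty dicts.
--     records = []
--     for block in blocks:
--         d = {}
--         for s in block:
--             kv = _split_kv(s)
--             if kv is not None:
--                 d[kv[0]] = kv[1]
--         if d:
--             records.append(d)
--     return records
-- ===== Notes on version B (the rewrite author's own statement) =====
-- stated objective: simpler
-- what changed: A interleaves record detection and key/value parsing in one stateful loop over a mutable dict; B first splits the lines into blocks at whitespace-only lines, then in a separate pass converts each block to a dict via a _split_kv helper using find and slicing instead of partition, keeping only non-empty dicts.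
import Mathlib
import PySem

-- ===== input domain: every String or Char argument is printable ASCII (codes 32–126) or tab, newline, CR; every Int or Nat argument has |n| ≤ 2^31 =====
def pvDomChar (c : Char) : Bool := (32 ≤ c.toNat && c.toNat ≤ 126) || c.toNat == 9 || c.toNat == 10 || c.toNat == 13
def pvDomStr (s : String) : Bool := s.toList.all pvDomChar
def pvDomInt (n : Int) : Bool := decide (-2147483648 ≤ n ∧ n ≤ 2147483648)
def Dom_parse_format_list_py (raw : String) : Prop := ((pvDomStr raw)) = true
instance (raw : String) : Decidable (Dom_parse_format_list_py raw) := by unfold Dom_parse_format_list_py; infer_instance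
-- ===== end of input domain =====

-- B splits the input once into blocks of stripped non-empty lines, then converts each
-- block to a dict in a second pass (objective: simpler two-pass decomposition, same cost).


-- ===== PORT A =====
-- str.partition(sep) for a present sep, ported by hand via the first occurrence
-- (PySem.Chars.find); exact because A only partitions under an 'in' guard.
def pvPartBefore (s sep : List Char) : List Char := s.take (PySem.Chars.find s sep).toNat
def pvPartAfter (s sep : List Char) : List Char :=
  s.drop ((PySem.Chars.find s sep).toNat + sep.length)

-- the for-loop of A, state = (records, current)
def pvLoopA (records : List (PySem.Dict (List Char) (List Char)))
    (current : PySem.Dict (List Char) (List Char)) :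
    List (List Char) → List (PySem.Dict (List Char) (List Char))
  | [] => if current.items.isEmpty then records else records ++ [current]
  | l :: rest =>
    let line := PySem.Chars.strip l
    if line.isEmpty then
      if current.items.isEmpty then pvLoopA records current rest
      else pvLoopA (records ++ [current]) PySem.Dict.empty rest
    else if PySem.Chars.isIn [' ', ':', ' '] line then
      pvLoopA records
        (current.insert (PySem.Chars.strip (pvPartBefore line [' ', ':', ' ']))
          (PySem.Chars.strip (pvPartAfter line [' ', ':', ' ']))) rest
    else if PySem.Chars.isIn [':'] line then
      pvLoopA records
        (current.insert (PySem.Chars.strip (pvPartBefore line [':']))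
          (PySem.Chars.strip (pvPartAfter line [':']))) rest
    else pvLoopA records current rest

def parse_format_list_py (raw : String) : List (List (String × String)) :=
  (pvLoopA [] PySem.Dict.empty ((PySem.Str.splitlines raw).map String.toList)).map
    (fun d => d.items.map (fun p => (String.ofList p.1, String.ofList p.2)))

-- ===== PORT B =====
-- _split_kv of Source B: ' : ' preferred over ':', slices around the found separator
def pvSplitKV (s : List Char) : Option (List Char × List Char) :=
  let i := PySem.Chars.find s [' ', ':', ' ']
  if 0 ≤ i then
    some (PySem.Chars.strip (s.take i.toNat), PySem.Chars.strip (s.drop (i.toNat + 3)))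
  else
    let j := PySem.Chars.find s [':']
    if 0 ≤ j then
      some (PySem.Chars.strip (s.take j.toNat), PySem.Chars.strip (s.drop (j.toNat + 1)))
    else none

-- pass 1 of Source B: blocks of stripped non-empty lines, blank lines close a block
def pvBlocksB (buf : List (List Char)) : List (List Char) → List (List (List Char))
  | [] => if buf.isEmpty then [] else [buf]
  | l :: rest =>
    let s := PySem.Chars.strip l
    if s.isEmpty then
      if buf.isEmpty then pvBlocksB buf rest else buf :: pvBlocksB [] rest
    else pvBlocksB (buf ++ [s]) rest

-- inner loop of pass 2: one block to one dict
def pvBlockDictB (b : List (List Char)) : PySem.Dict (List Char) (List Char) :=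
  b.foldl (fun d s => match pvSplitKV s with
    | some kv => d.insert kv.1 kv.2
    | none => d) PySem.Dict.empty

def parse_format_list_py_alt (raw : String) : List (List (String × String)) :=
  ((pvBlocksB [] ((PySem.Str.splitlines raw).map String.toList)).foldl
      (fun recs b =>
        let d := pvBlockDictB b
        if d.items.isEmpty then recs else recs ++ [d]) []).map
    (fun d => d.items.map (fun p => (String.ofList p.1, String.ofList p.2)))

-- ===== PRECONDITION & SPEC =====
def Spec_parse_format_list_py (raw : String) (out : List (List (String × String))) : Prop := out = parse_format_list_py_alt raw
instance (raw : String) (out : List (List (String × String))) : Decidable (Spec_parse_format_list_py raw out) := by unfold Spec_parse_format_list_py; infer_instance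

-- ===== CLAIM (what is proved, stated in full; the proofs are below) =====
def Claim_equal_parse_format_list_py : Prop := ∀ (raw : String), Dom_parse_format_list_py raw → Spec_parse_format_list_py raw (parse_format_list_py raw)

-- ===== LEMMAS AND PROOFS =====

-- recursive form of B's pass 2 (proof helper)
def pvConv : List (List (List Char)) → List (PySem.Dict (List Char) (List Char))
  | [] => []
  | b :: bs =>
    (if (pvBlockDictB b).items.isEmpty then [] else [pvBlockDictB b]) ++ pvConv bs

theorem pvConv_foldl (blocks : List (List (List Char)))
    (recs : List (PySem.Dict (List Char) (List Char))) :
    blocks.foldl (fun recs b =>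
        let d := pvBlockDictB b
        if d.items.isEmpty then recs else recs ++ [d]) recs = recs ++ pvConv blocks := by
  induction blocks generalizing recs with
  | nil => simp [pvConv]
  | cons b bs ih => simp only [List.foldl_cons, pvConv, ih]; split <;> simp

theorem pvDict_items_empty (d : PySem.Dict (List Char) (List Char))
    (h : d.items.isEmpty = true) : d = PySem.Dict.empty := by
  cases d; simp_all [PySem.Dict.empty, List.isEmpty_iff]

theorem pvBlockDictB_append (b : List (List Char)) (s : List Char) :
    pvBlockDictB (b ++ [s]) = match pvSplitKV s with
      | some kv => (pvBlockDictB b).insert kv.1 kv.2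
      | none => pvBlockDictB b := by
  simp [pvBlockDictB, List.foldl_append]

-- main invariant: A's single pass with current = dict of the open block
-- equals records ++ B's conversion of the remaining blocks
theorem pvMain (lines : List (List Char)) :
    ∀ (records : List (PySem.Dict (List Char) (List Char))) (buf : List (List Char)),
      pvLoopA records (pvBlockDictB buf) lines = records ++ pvConv (pvBlocksB buf lines) := by
  induction lines with
  | nil =>
    intro records buf
    simp only [pvLoopA, pvBlocksB]
    by_cases hb : buf.isEmpty
    · have : buf = [] := List.isEmpty_iff.mp hb
      subst this
      simp [pvBlockDictB, pvConv, PySem.Dict.empty]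
    · simp only [hb, if_neg, Bool.false_eq_true, not_false_eq_true, pvConv]
      split <;> simp
  | cons l rest ih =>
    intro records buf
    simp only [pvLoopA, pvBlocksB]
    by_cases hl : (PySem.Chars.strip l).isEmpty
    · simp only [hl, if_true]
      by_cases hd : (pvBlockDictB buf).items.isEmpty
      · -- buf's dict is empty: A keeps state; B either keeps buf=[] or drops an empty block
        simp only [hd, if_true]
        by_cases hb : buf.isEmpty
        · have : buf = [] := List.isEmpty_iff.mp hb
          subst this; simp [ih]
        · simp only [hb, Bool.false_eq_true, if_false, pvConv, hd, if_true,
            List.nil_append]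
          have := pvDict_items_empty _ hd
          have h0 : pvBlockDictB [] = PySem.Dict.empty := rfl
          rw [show pvBlockDictB buf = pvBlockDictB [] from this.trans h0.symm] at *
          exact ih records []
      · -- buf's dict is non-empty: A closes the record, B closes the block
        have hb : ¬ buf.isEmpty := by
          intro h
          have : buf = [] := List.isEmpty_iff.mp h
          subst this; simp [pvBlockDictB, PySem.Dict.empty] at hd
        simp only [hd, Bool.false_eq_true, if_false]
        have hb' : buf.isEmpty = false := Bool.eq_false_iff.mpr hb
        simp only [hb', Bool.false_eq_true, if_false, pvConv, hd]
        have h0 : (PySem.Dict.empty : PySem.Dict (List Char) (List Char)) = pvBlockDictB [] := rfl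
        rw [h0, ih (records ++ [pvBlockDictB buf]) []]
        simp
    · -- non-blank line: A updates the dict, B extends the buffer
      have hl' : (PySem.Chars.strip l).isEmpty = false := Bool.eq_false_iff.mpr hl
      simp only [hl', Bool.false_eq_true, if_false]
      have hstep : ∀ r, pvLoopA r (pvBlockDictB (buf ++ [PySem.Chars.strip l])) rest =
          r ++ pvConv (pvBlocksB (buf ++ [PySem.Chars.strip l]) rest) := fun r => ih r _
      rw [pvBlockDictB_append] at hstep
      by_cases h3 : PySem.Chars.isIn [' ', ':', ' '] (PySem.Chars.strip l) = true
      · have hf : 0 ≤ PySem.Chars.find (PySem.Chars.strip l) [' ', ':', ' '] :=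
          (PySem.Chars.find_nonneg_iff _ _).mpr ((PySem.Chars.isIn_iff_infix _ _).mp h3)
        simp only [h3, if_true]
        have : pvSplitKV (PySem.Chars.strip l) =
            some (PySem.Chars.strip (pvPartBefore (PySem.Chars.strip l) [' ', ':', ' ']),
              PySem.Chars.strip (pvPartAfter (PySem.Chars.strip l) [' ', ':', ' '])) := by
          simp [pvSplitKV, hf, pvPartBefore, pvPartAfter]
        rw [this] at hstep
        exact hstep records
      · have hf : ¬ (0 ≤ PySem.Chars.find (PySem.Chars.strip l) [' ', ':', ' ']) := by
          intro h
          exact h3 ((PySem.Chars.isIn_iff_infix _ _).mpr ((PySem.Chars.find_nonneg_iff _ _).mp h))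
        simp only [h3, Bool.false_eq_true, if_false]
        by_cases h1 : PySem.Chars.isIn [':'] (PySem.Chars.strip l) = true
        · have hf1 : 0 ≤ PySem.Chars.find (PySem.Chars.strip l) [':'] :=
            (PySem.Chars.find_nonneg_iff _ _).mpr ((PySem.Chars.isIn_iff_infix _ _).mp h1)
          simp only [h1, if_true]
          have : pvSplitKV (PySem.Chars.strip l) =
              some (PySem.Chars.strip (pvPartBefore (PySem.Chars.strip l) [':']),
                PySem.Chars.strip (pvPartAfter (PySem.Chars.strip l) [':'])) := by
            simp [pvSplitKV, hf, hf1, pvPartBefore, pvPartAfter]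
          rw [this] at hstep
          exact hstep records
        · have hf1 : ¬ (0 ≤ PySem.Chars.find (PySem.Chars.strip l) [':']) := by
            intro h
            exact h1 ((PySem.Chars.isIn_iff_infix _ _).mpr ((PySem.Chars.find_nonneg_iff _ _).mp h))
          simp only [h1, Bool.false_eq_true, if_false]
          have : pvSplitKV (PySem.Chars.strip l) = none := by
            simp [pvSplitKV, hf, hf1]
          rw [this] at hstep
          exact hstep records

-- ===== VERDICT (by name: the statement is the Claim_ definition above) =====
theorem parse_format_list_py_spec : Claim_equal_parse_format_list_py := by
  intro raw _
  unfold Spec_parse_format_list_py parse_format_list_py parse_format_list_py_alt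
  rw [pvConv_foldl]
  have h0 : (PySem.Dict.empty : PySem.Dict (List Char) (List Char)) = pvBlockDictB [] := rfl
  rw [h0, pvMain]
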